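-- pv_equiv track=rewrite | github.com/Masha212121/Homework | пр9 №8.py | count_sum_of_squares
-- ===== SOURCE A (Python) =====
-- import math
--
-- def count_sum_of_squares(x):
--     count = 0
--     max_a = int(math.isqrt(x))
--     for a in range(1, max_a + 1):
--         remainder = x - a * a
--         if remainder <= 0:
--             continue
--         b = math.isqrt(remainder)
--         if b * b == remainder and a <= b:
--             count += 1
--     return count
-- ===== SOURCE B (Python) =====
-- import math
--
-- def count_sum_of_squares(x):
--     hi = math.isqrt(x)
--     lo = 1
--     count = 0
--     while lo <= hi:
--         s = lo * lo + hi * hi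
--         if s == x:
--             count += 1
--             lo += 1
--             hi -= 1
--         elif s < x:
--             lo += 1
--         else:
--             hi -= 1
--     return count
-- ===== Notes on version B (the rewrite author's own statement) =====
-- stated objective: alternative
-- what changed: Replaced the per-candidate isqrt perfect-square test over every candidate a with a single two-pointer sweep that moves lo up and hi down by comparing lo*lo+hi*hi with x, calling isqrt once in total.
import Mathlib
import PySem

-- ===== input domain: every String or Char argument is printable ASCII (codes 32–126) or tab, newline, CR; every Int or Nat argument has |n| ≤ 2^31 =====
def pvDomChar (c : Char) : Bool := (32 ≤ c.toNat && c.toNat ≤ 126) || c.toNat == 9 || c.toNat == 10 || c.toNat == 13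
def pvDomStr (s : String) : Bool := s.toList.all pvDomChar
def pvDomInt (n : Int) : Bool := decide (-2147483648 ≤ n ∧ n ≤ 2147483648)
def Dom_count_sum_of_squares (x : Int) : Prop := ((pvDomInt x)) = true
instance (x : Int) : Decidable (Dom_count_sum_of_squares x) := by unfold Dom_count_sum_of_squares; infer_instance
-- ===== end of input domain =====

-- B replaces A's per-candidate isqrt test with a single two-pointer sweep (one isqrt call total); return values agree for all x ≥ 0.

-- ===== PORT A =====
-- math.isqrt(x) for x ≥ 0 (guaranteed by Pre_) is exactly Nat.sqrt x.toNat
def count_sum_of_squares (x : Int) : Int :=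
  let max_a : Int := (Nat.sqrt x.toNat : Int)
  (PySem.List.pyRange 1 (max_a + 1) 1).foldl
    (fun count a =>
      let remainder := x - a * a
      if remainder ≤ 0 then count
      else
        let b : Int := (Nat.sqrt remainder.toNat : Int)
        if b * b = remainder ∧ a ≤ b then count + 1 else count)
    0

-- ===== PORT B =====
-- the two-pointer while-loop of Source B
def tpLoop (x lo hi count : Int) : Int :=
  if _h : lo ≤ hi then
    let s := lo * lo + hi * hi
    if s = x then tpLoop x (lo + 1) (hi - 1) (count + 1)
    else if s < x then tpLoop x (lo + 1) hi count
    else tpLoop x lo (hi - 1) count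
  else count
termination_by (hi + 1 - lo).toNat
decreasing_by all_goals omega

def count_sum_of_squares_alt (x : Int) : Int :=
  tpLoop x 1 ((Nat.sqrt x.toNat : Int)) 0

-- ===== PRECONDITION & SPEC =====
-- math.isqrt raises ValueError for x < 0 (in both A and B); Pre_ excludes exactly those inputs.
def Pre_count_sum_of_squares (x : Int) : Prop := 0 ≤ x
instance (x : Int) : Decidable (Pre_count_sum_of_squares x) := by unfold Pre_count_sum_of_squares; infer_instance
def pvWitness_count_sum_of_squares : Int := (25)

def Spec_count_sum_of_squares (x : Int) (out : Int) : Prop := out = count_sum_of_squares_alt x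
instance (x : Int) (out : Int) : Decidable (Spec_count_sum_of_squares x out) := by unfold Spec_count_sum_of_squares; infer_instance

-- ===== CLAIM (what is proved, stated in full; the proofs are below) =====
def Claim_equal_count_sum_of_squares : Prop := ∀ (x : Int), Dom_count_sum_of_squares x → Pre_count_sum_of_squares x → Spec_count_sum_of_squares x (count_sum_of_squares x)

-- ===== LEMMAS AND PROOFS =====

-- the common mathematical value: number of pairs lo ≤ a ≤ b ≤ hi with a² + b² = x (proof-only helper)
noncomputable def pairCount (x lo hi : Int) : ℕ :=
  ((Finset.Icc lo hi ×ˢ Finset.Icc lo hi).filter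
    (fun p => p.1 ≤ p.2 ∧ p.1 * p.1 + p.2 * p.2 = x)).card

lemma int_sqrt_sq (b : Int) (hb : 0 ≤ b) : ((Nat.sqrt (b * b).toNat : ℕ) : Int) = b := by
  have h : (b * b).toNat = b.toNat * b.toNat := by
    rw [Int.toNat_mul hb hb]
  rw [h, Nat.sqrt_eq]
  omega

lemma int_le_sqrt (t x : Int) (ht : 0 ≤ t) (h : t * t ≤ x) :
    t ≤ ((Nat.sqrt x.toNat : ℕ) : Int) := by
  have h1 : t.toNat * t.toNat ≤ x.toNat := by
    have := Int.toNat_mul ht ht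
    omega
  have h2 : t.toNat ≤ Nat.sqrt x.toNat := Nat.le_sqrt.mpr (by simpa [Nat.pow_two] using h1)
  omega

lemma sq_eq (a b : Int) (ha : 0 ≤ a) (hb : 0 ≤ b) (h : a * a = b * b) : a = b := by
  have h2 : (a - b) * (a + b) = 0 := by ring_nf; linarith
  rcases mul_eq_zero.mp h2 with h3 | h3 <;> omega

-- two-pointer invariant
lemma tpLoop_eq (x : Int) :
    ∀ n (lo hi count : Int), (hi + 1 - lo).toNat = n → 1 ≤ lo →
      tpLoop x lo hi count = count + (pairCount x lo hi : Int) := by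
  intro n
  induction n using Nat.strong_induction_on with
  | _ n ih =>
    intro lo hi count hn hlo
    rw [tpLoop]
    by_cases hle : lo ≤ hi
    · simp only [hle, dite_true]
      have hhi : 1 ≤ hi := le_trans hlo hle
      by_cases heq : lo * lo + hi * hi = x
      · simp only [heq, if_true]
        rw [ih (hi - 1 + 1 - (lo + 1)).toNat (by omega) (lo + 1) (hi - 1) (count + 1) rfl (by omega)]
        have hset : (Finset.Icc lo hi ×ˢ Finset.Icc lo hi).filter
            (fun p => p.1 ≤ p.2 ∧ p.1 * p.1 + p.2 * p.2 = x)
            = insert (lo, hi) ((Finset.Icc (lo+1) (hi-1) ×ˢ Finset.Icc (lo+1) (hi-1)).filter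
            (fun p => p.1 ≤ p.2 ∧ p.1 * p.1 + p.2 * p.2 = x)) := by
          ext ⟨a, b⟩
          simp only [Finset.mem_filter, Finset.mem_insert, Finset.mem_product, Finset.mem_Icc,
            Prod.mk.injEq]
          constructor
          · rintro ⟨⟨⟨ha1, ha2⟩, hb1, hb2⟩, hab, hsum⟩
            by_cases hbh : b = hi
            · left
              refine ⟨?_, hbh⟩
              subst hbh
              exact sq_eq a lo (by omega) (by omega) (by linarith)
            · right
              have hane : a ≠ lo := by
                intro h; subst h
                exact hbh (sq_eq b hi (by omega) (by omega) (by linarith))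
              refine ⟨⟨⟨by omega, by omega⟩, by omega, by omega⟩, hab, hsum⟩
          · rintro (⟨h1, h2⟩ | ⟨⟨⟨ha1, ha2⟩, hb1, hb2⟩, hab, hsum⟩)
            · subst h1; subst h2
              exact ⟨⟨⟨le_refl _, hle⟩, hle, le_refl _⟩, hle, heq⟩
            · exact ⟨⟨⟨by omega, by omega⟩, by omega, by omega⟩, hab, hsum⟩
        have hnotmem : (lo, hi) ∉ ((Finset.Icc (lo+1) (hi-1) ×ˢ Finset.Icc (lo+1) (hi-1)).filter
            (fun p => p.1 ≤ p.2 ∧ p.1 * p.1 + p.2 * p.2 = x)) := by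
          simp only [Finset.mem_filter, Finset.mem_product, Finset.mem_Icc]
          omega
        unfold pairCount
        rw [hset, Finset.card_insert_of_notMem hnotmem]
        push_cast
        ring
      · by_cases hlt : lo * lo + hi * hi < x
        · simp only [heq, hlt, if_false, if_true]
          rw [ih (hi + 1 - (lo + 1)).toNat (by omega) (lo + 1) hi count rfl (by omega)]
          have hset : (Finset.Icc lo hi ×ˢ Finset.Icc lo hi).filter
              (fun p => p.1 ≤ p.2 ∧ p.1 * p.1 + p.2 * p.2 = x)
              = ((Finset.Icc (lo+1) hi ×ˢ Finset.Icc (lo+1) hi).filter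
              (fun p => p.1 ≤ p.2 ∧ p.1 * p.1 + p.2 * p.2 = x)) := by
            ext ⟨a, b⟩
            simp only [Finset.mem_filter, Finset.mem_product, Finset.mem_Icc]
            constructor
            · rintro ⟨⟨⟨ha1, ha2⟩, hb1, hb2⟩, hab, hsum⟩
              have hane : a ≠ lo := by
                intro h; subst h
                have hbb : b * b ≤ hi * hi := mul_le_mul hb2 hb2 (by omega) (by omega)
                linarith
              exact ⟨⟨⟨by omega, by omega⟩, by omega, by omega⟩, hab, hsum⟩
            · rintro ⟨⟨⟨ha1, ha2⟩, hb1, hb2⟩, hab, hsum⟩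
              exact ⟨⟨⟨by omega, by omega⟩, by omega, by omega⟩, hab, hsum⟩
          unfold pairCount
          rw [hset]
        · simp only [heq, hlt, if_false]
          rw [ih (hi - 1 + 1 - lo).toNat (by omega) lo (hi - 1) count rfl hlo]
          have hset : (Finset.Icc lo hi ×ˢ Finset.Icc lo hi).filter
              (fun p => p.1 ≤ p.2 ∧ p.1 * p.1 + p.2 * p.2 = x)
              = ((Finset.Icc lo (hi-1) ×ˢ Finset.Icc lo (hi-1)).filter
              (fun p => p.1 ≤ p.2 ∧ p.1 * p.1 + p.2 * p.2 = x)) := by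
            ext ⟨a, b⟩
            simp only [Finset.mem_filter, Finset.mem_product, Finset.mem_Icc]
            constructor
            · rintro ⟨⟨⟨ha1, ha2⟩, hb1, hb2⟩, hab, hsum⟩
              have hbne : b ≠ hi := by
                intro h; subst h
                have hgt : x < lo * lo + b * b := lt_of_le_of_ne (not_lt.mp hlt) (Ne.symm heq)
                have haa : lo * lo ≤ a * a := mul_le_mul ha1 ha1 (by omega) (by omega)
                linarith
              exact ⟨⟨⟨by omega, by omega⟩, by omega, by omega⟩, hab, hsum⟩
            · rintro ⟨⟨⟨ha1, ha2⟩, hb1, hb2⟩, hab, hsum⟩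
              exact ⟨⟨⟨by omega, by omega⟩, by omega, by omega⟩, hab, hsum⟩
          unfold pairCount
          rw [hset]
    · simp only [hle, dite_false]
      have : Finset.Icc lo hi = ∅ := Finset.Icc_eq_empty (by omega)
      unfold pairCount
      rw [this]
      simp

-- A's per-a condition, as a Bool test
def aCond (x a : Int) : Bool :=
  !decide (x - a * a ≤ 0) &&
    (decide ((Nat.sqrt (x - a * a).toNat : Int) * (Nat.sqrt (x - a * a).toNat : Int) = x - a * a)
      && decide (a ≤ (Nat.sqrt (x - a * a).toNat : Int)))

lemma a_fold_eq_countP (x m : Int) :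
    (PySem.List.pyRange 1 (m + 1) 1).foldl
      (fun count a =>
        let remainder := x - a * a
        if remainder ≤ 0 then count
        else
          let b : Int := (Nat.sqrt remainder.toNat : Int)
          if b * b = remainder ∧ a ≤ b then count + 1 else count)
      0
    = ((PySem.List.pyRange 1 (m + 1) 1).countP (aCond x) : Int) := by
  rw [PySem.List.foldl_congr_mem
    (g := fun count a => if aCond x a then count + 1 else count)]
  · rw [PySem.List.foldl_if_add_one]
    ring
  · intro acc a _
    simp only [aCond]
    by_cases h1 : x - a * a ≤ 0
    · simp [h1]
    · by_cases h2 : ((Nat.sqrt (x - a * a).toNat : Int) * (Nat.sqrt (x - a * a).toNat : Int)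
          = x - a * a)
      · by_cases h3 : a ≤ (Nat.sqrt (x - a * a).toNat : Int)
        · simp [h1, h2, h3]
        · simp [h1, h2, h3]
      · simp [h1, h2]

lemma countP_pyRange_eq_card (m : Int) (q : Int → Bool) :
    ((PySem.List.pyRange 1 (m + 1) 1).countP q)
      = ((Finset.Icc 1 m).filter (fun a => q a = true)).card := by
  have hnd : (PySem.List.pyRange 1 (m + 1) 1).Nodup := PySem.List.nodup_pyRange_one 1 (m + 1)
  rw [List.countP_eq_length_filter]
  have hnd2 : ((PySem.List.pyRange 1 (m + 1) 1).filter q).Nodup := hnd.filter _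
  rw [← List.toFinset_card_of_nodup hnd2]
  congr 1
  ext a
  simp only [List.mem_toFinset, List.mem_filter, Finset.mem_filter, Finset.mem_Icc,
    PySem.List.mem_pyRange_one]
  constructor
  · rintro ⟨⟨h1, h2⟩, h3⟩
    exact ⟨⟨h1, by omega⟩, h3⟩
  · rintro ⟨⟨h1, h2⟩, h3⟩
    exact ⟨⟨h1, by omega⟩, h3⟩

-- the number of a satisfying A's condition is the number of pairs
lemma card_aCond_eq_pairCount (x : Int) (_hx : 0 ≤ x) :
    ((Finset.Icc 1 ((Nat.sqrt x.toNat : Int))).filter (fun a => aCond x a = true)).card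
      = pairCount x 1 ((Nat.sqrt x.toNat : Int)) := by
  unfold pairCount
  apply Finset.card_bij' (i := fun a _ => (a, ((Nat.sqrt (x - a * a).toNat : Int))))
    (j := fun p _ => p.1)
  · intro a ha
    simp only [Finset.mem_filter, Finset.mem_Icc, aCond, Bool.and_eq_true, Bool.not_eq_true',
      decide_eq_true_eq, decide_eq_false_iff_not] at ha
    obtain ⟨⟨ha1, ha2⟩, hpos, hsq, hab⟩ := ha
    simp only [Finset.mem_filter, Finset.mem_product, Finset.mem_Icc]
    refine ⟨⟨⟨ha1, ha2⟩, ?_, ?_⟩, hab, by linarith⟩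
    · omega
    · exact int_le_sqrt _ _ (by positivity) (by nlinarith)
  · intro p hp
    simp only [Finset.mem_filter, Finset.mem_product, Finset.mem_Icc] at hp
    obtain ⟨⟨⟨ha1, ha2⟩, hb1, hb2⟩, hab, hsum⟩ := hp
    simp only [Finset.mem_filter, Finset.mem_Icc, aCond, Bool.and_eq_true, Bool.not_eq_true',
      decide_eq_true_eq, decide_eq_false_iff_not]
    have hrem : x - p.1 * p.1 = p.2 * p.2 := by linarith
    have hs : ((Nat.sqrt (x - p.1 * p.1).toNat : ℕ) : Int) = p.2 := by
      rw [hrem]; exact int_sqrt_sq _ (by omega)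
    refine ⟨⟨ha1, ha2⟩, by nlinarith, by rw [hs]; omega, by rw [hs]; exact hab⟩
  · intro a ha; rfl
  · intro p hp
    simp only [Finset.mem_filter, Finset.mem_product, Finset.mem_Icc] at hp
    obtain ⟨⟨⟨ha1, ha2⟩, hb1, hb2⟩, hab, hsum⟩ := hp
    have hrem : x - p.1 * p.1 = p.2 * p.2 := by linarith
    have hs : ((Nat.sqrt (x - p.1 * p.1).toNat : ℕ) : Int) = p.2 := by
      rw [hrem]; exact int_sqrt_sq _ (by omega)
    simp [hs]

-- ===== VERDICT (by name: the statement is the Claim_ definition above) =====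
theorem count_sum_of_squares_spec : Claim_equal_count_sum_of_squares := by
  intro x _ hpre
  unfold Spec_count_sum_of_squares count_sum_of_squares count_sum_of_squares_alt
  rw [tpLoop_eq x ((Nat.sqrt x.toNat : Int) + 1 - 1).toNat 1 _ 0 rfl (le_refl 1)]
  rw [a_fold_eq_countP, countP_pyRange_eq_card _ (aCond x), card_aCond_eq_pairCount x hpre]
  simp
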